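-- pv_equiv track=rewrite | github.com/KhongCL/MCC-2023 | MCC 2023 sum^k.py | sum_of_scores
-- ===== SOURCE A (Python) =====
-- def sum_of_scores(N, K, A):
--     result = 0
--
--     for i in range(1, 2**N):
--         subset_sum = 0
--         for j in range(N):
--             if (i >> j) & 1:
--                 subset_sum += A[j]
--         result += subset_sum**K
--
--     return result % 998244353
-- ===== SOURCE B (Python) =====
-- def sum_of_scores(N, K, A):
--     # Build all 2^N subset sums of A[:N] by doubling (element j sits at bit j),
--     # then add up their K-th powers and drop the empty subset's contribution.
--     sums = [0]
--     for a in A[:N]: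
--         sums += [s + a for s in sums]
--     total = sum(s ** K for s in sums) - (1 if K == 0 else 0)
--     return total % 998244353
-- ===== Notes on version B (the rewrite author's own statement) =====
-- stated objective: alternative
-- what changed: B builds the 2^N subset sums incrementally by doubling a list over the elements instead of re-deriving each subset sum from the bitmask with an inner loop over all N bits.
-- outside the precondition, e.g. on sum_of_scores(0, -1, []): A returns 0, B raises ZeroDivisionError; on sum_of_scores(1, -1, [2]): A returns 0.5, B raises ZeroDivisionError
import Mathlib
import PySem

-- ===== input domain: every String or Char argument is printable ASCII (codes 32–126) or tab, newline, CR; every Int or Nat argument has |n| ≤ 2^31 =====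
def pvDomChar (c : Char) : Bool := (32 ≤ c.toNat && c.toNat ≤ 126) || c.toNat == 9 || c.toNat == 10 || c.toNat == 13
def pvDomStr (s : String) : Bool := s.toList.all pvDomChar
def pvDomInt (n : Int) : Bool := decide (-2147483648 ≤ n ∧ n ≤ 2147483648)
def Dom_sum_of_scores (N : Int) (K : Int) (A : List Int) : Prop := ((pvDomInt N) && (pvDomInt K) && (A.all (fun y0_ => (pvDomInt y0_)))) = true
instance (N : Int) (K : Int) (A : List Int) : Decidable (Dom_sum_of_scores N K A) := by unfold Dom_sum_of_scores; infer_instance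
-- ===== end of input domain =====

-- B replaces A's per-bitmask inner loop by one doubling pass that builds all 2^N subset sums;
-- return-value equivalence is proved on Pre_ (0 ≤ N ≤ len(A), 0 ≤ K).

-- ===== PORT A =====
-- `2**N` is ported as 2 ^ N.toNat (exact for N ≥ 0, Pre_), `i >> j` as `i >>> j.toNat` (exact
-- since j ∈ range(N) is ≥ 0), the truthiness of `(i >> j) & 1` as ≠ 0, and `A[j]` as pyGetD
-- (in range under Pre_'s N ≤ len A).
def sum_of_scores (N : Int) (K : Int) (A : List Int) : Int :=
  let result : Int :=
    (PySem.List.pyRange 1 ((2:Int) ^ N.toNat) 1).foldl (fun result i =>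
      let subset_sum : Int :=
        (PySem.List.pyRange 0 N 1).foldl (fun subset_sum j =>
          if PySem.Int.band (i >>> j.toNat) 1 ≠ 0 then subset_sum + PySem.List.pyGetD A j 0
          else subset_sum) 0
      result + subset_sum ^ K.toNat) 0
  PySem.Int.mod result 998244353

-- ===== PORT B =====
-- `s ** K` is ported as s ^ K.toNat (exact for K ≥ 0, Pre_).
def sum_of_scores_alt (N : Int) (K : Int) (A : List Int) : Int :=
  let sums : List Int :=
    (PySem.List.slice A none (some N)).foldl (fun sums a => sums ++ sums.map (fun s => s + a)) [0]
  let total : Int := (sums.map (fun s => s ^ K.toNat)).sum - (if K == 0 then 1 else 0)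
  PySem.Int.mod total 998244353

-- ===== PRECONDITION & SPEC =====
-- Pre_ excludes: N < 0 (A raises TypeError), len(A) < N (A raises IndexError), and K < 0,
-- where A raises ZeroDivisionError or returns a float — except the degenerate N ≤ 0, K < 0
-- corner where A returns 0 and B itself raises (see cites).
def Pre_sum_of_scores (N : Int) (K : Int) (A : List Int) : Prop :=
  0 ≤ N ∧ N ≤ A.length ∧ 0 ≤ K
instance (N : Int) (K : Int) (A : List Int) : Decidable (Pre_sum_of_scores N K A) := by
  unfold Pre_sum_of_scores; infer_instance
def pvWitness_sum_of_scores : Int × Int × List Int := (2, 2, [1, 2])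

def Spec_sum_of_scores (N : Int) (K : Int) (A : List Int) (out : Int) : Prop :=
  out = sum_of_scores_alt N K A
instance (N : Int) (K : Int) (A : List Int) (out : Int) : Decidable (Spec_sum_of_scores N K A out) := by
  unfold Spec_sum_of_scores; infer_instance

-- ===== CLAIM (what is proved, stated in full; the proofs are below) =====
def Claim_equal_sum_of_scores : Prop := ∀ (N : Int) (K : Int) (A : List Int), Dom_sum_of_scores N K A → Pre_sum_of_scores N K A → Spec_sum_of_scores N K A (sum_of_scores N K A)

-- ===== LEMMAS AND PROOFS =====

-- bitsum L m = the subset sum of L selected by the bits of the mask m (bit j picks L[j]).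
def bitsum (L : List Int) (m : Nat) : Int :=
  ((List.range L.length).map (fun j => if m.testBit j then L.getD j 0 else 0)).sum

lemma bitsum_zero (L : List Int) : bitsum L 0 = 0 := by
  simp [bitsum]

lemma bitsum_append_lt (L : List Int) (a : Int) (m : Nat) (h : m < 2 ^ L.length) :
    bitsum (L ++ [a]) m = bitsum L m := by
  unfold bitsum
  rw [List.length_append, List.length_singleton, List.range_succ, List.map_append,
      List.sum_append]
  rw [List.map_congr_left (g := fun j => if m.testBit j then L.getD j 0 else 0)
      (fun j hj => by
        have hj' : j < L.length := List.mem_range.mp hj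
        rw [List.getD_append _ _ _ _ hj'])]
  simp [Nat.testBit_lt_two_pow h]

lemma bitsum_append_add (L : List Int) (a : Int) (m : Nat) (h : m < 2 ^ L.length) :
    bitsum (L ++ [a]) (2 ^ L.length + m) = bitsum L m + a := by
  unfold bitsum
  rw [List.length_append, List.length_singleton, List.range_succ, List.map_append,
      List.sum_append]
  rw [List.map_congr_left (g := fun j => if m.testBit j then L.getD j 0 else 0)
      (fun j hj => by
        have hj' : j < L.length := List.mem_range.mp hj
        rw [List.getD_append _ _ _ _ hj', Nat.testBit_two_pow_add_gt hj'])]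
  simp [Nat.testBit_two_pow_add_eq, Nat.testBit_lt_two_pow h]

-- B's doubling pass lists exactly the bitmask subset sums, in mask order.
lemma doubling_eq_bitsum (L : List Int) :
    L.foldl (fun sums a => sums ++ sums.map (fun s => s + a)) [0]
      = (List.range (2 ^ L.length)).map (bitsum L) := by
  induction L using List.reverseRecOn with
  | nil => simp [bitsum]
  | append_singleton L a ih =>
    rw [List.foldl_append, List.foldl_cons, List.foldl_nil, ih]
    have hlen : (L ++ [a]).length = L.length + 1 := by simp
    rw [hlen, pow_succ, mul_two, List.range_add, List.map_append, List.map_map]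
    congr 1
    · exact List.map_congr_left (fun m hm =>
        (bitsum_append_lt L a m (List.mem_range.mp hm)).symm)
    · rw [List.map_map]
      exact List.map_congr_left (fun m hm => by
        have := bitsum_append_add L a m (List.mem_range.mp hm)
        simp [Function.comp, this])

lemma band_shift_ne (m jn : Nat) :
    (PySem.Int.band (@HShiftRight.hShiftRight Int Nat Int Int.instHShiftRightNat ((m:Nat):Int) jn) 1 ≠ 0)
      = (m.testBit jn = true) := by
  rw [← Int.natCast_shiftRight]
  simp only [PySem.Int.band_one]
  rw [PySem.Int.mod_eq_emod_of_pos (by omega : (0:Int) < 2)]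
  simp only [Nat.testBit, Nat.one_and_eq_mod_two, bne_iff_ne, ne_eq, eq_iff_iff]
  omega

-- A's inner bit loop computes bitsum of the first n elements.
lemma inner_eq (A : List Int) (n : Nat) (hn : n ≤ A.length) (m : Nat) :
    (PySem.List.pyRange 0 (n : Int) 1).foldl (fun subset_sum j =>
        if PySem.Int.band (@HShiftRight.hShiftRight Int Nat Int Int.instHShiftRightNat ((m:Nat):Int) j.toNat) 1 ≠ 0
        then subset_sum + PySem.List.pyGetD A j 0
        else subset_sum) 0 = bitsum (A.take n) m := by
  rw [PySem.List.pyRange_zero_nat, List.foldl_map]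
  simp only [Int.toNat_natCast, band_shift_ne, PySem.List.pyGetD_natCast]
  have hfun : ∀ (x : Int) (y : Nat),
      (if m.testBit y = true then x + A.getD y 0 else x)
        = x + (if m.testBit y then A.getD y 0 else 0) := by
    intro x y; split <;> simp
  simp only [hfun]
  rw [PySem.List.foldl_add, zero_add]
  unfold bitsum
  rw [List.length_take, Nat.min_eq_left hn]
  refine congrArg List.sum (List.map_congr_left fun j hj => ?_)
  have hj' : j < n := List.mem_range.mp hj
  rw [List.getD_eq_getElem?_getD, List.getD_eq_getElem?_getD, List.getElem?_take_of_lt hj']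

-- ===== VERDICT (by name: the statement is the Claim_ definition above) =====
-- splitting off mask 0 from the mask sum (F is the per-mask summand)
lemma mask_sum_split (F : Int → Int) (M : Nat) (h : 0 < M) :
    ((PySem.List.pyRange 1 ((M:Nat):Int) 1).map F).sum
      = ((List.range M).map (fun m => F ((m:Nat):Int))).sum - F (((0:Nat):Int)) := by
  have hpos : (0:Int) < ((M:Nat):Int) := by exact_mod_cast h
  have hcons : (List.range M).map (fun x => ((x:Nat):Int))
      = (0:Int) :: PySem.List.pyRange 1 ((M:Nat):Int) 1 := by
    rw [← PySem.List.pyRange_zero_nat]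
    simpa using PySem.List.pyRange_one_cons hpos
  have h2 := congrArg (List.map F) hcons
  rw [List.map_map, List.map_cons] at h2
  have h3 := congrArg List.sum h2
  rw [List.sum_cons] at h3
  simp only [Function.comp_def, Nat.cast_zero] at h3 ⊢
  omega

theorem sum_of_scores_spec : Claim_equal_sum_of_scores := by
  intro N K A _ hP
  obtain ⟨hN, hNlen, hK⟩ := hP
  obtain ⟨n, rfl⟩ := Int.eq_ofNat_of_zero_le hN
  obtain ⟨kk, rfl⟩ := Int.eq_ofNat_of_zero_le hK
  have hlen : n ≤ A.length := by exact_mod_cast hNlen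
  unfold Spec_sum_of_scores sum_of_scores sum_of_scores_alt
  simp only [Int.toNat_natCast]
  -- B side: slice → take, doubling pass → bitmask subset sums
  rw [PySem.List.slice_to A (Int.natCast_nonneg n), Int.toNat_natCast, doubling_eq_bitsum,
      List.length_take, Nat.min_eq_left hlen, List.map_map]
  -- A side: outer foldl → sum over masks 1..2^n-1, split off mask 0
  have hM : (2:Int) ^ n = ((2 ^ n : Nat) : Int) := by push_cast; ring
  rw [hM, PySem.List.foldl_add, zero_add, mask_sum_split _ (2 ^ n) (Nat.two_pow_pos n)]
  -- identify each summand with a bitmask subset sum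
  simp only [inner_eq A n hlen, bitsum_zero, Function.comp_def]
  -- the empty-subset correction
  have hpow : ((0:Int)) ^ kk = (if ((kk:Int) == 0) = true then (1:Int) else 0) := by
    rcases Nat.eq_zero_or_pos kk with h | h
    · subst h; simp
    · have hne : ((kk:Int) == 0) = false := by
        simp only [beq_eq_false_iff_ne, ne_eq]
        exact_mod_cast Nat.pos_iff_ne_zero.mp h
      rw [hne, zero_pow (Nat.pos_iff_ne_zero.mp h)]
      simp
  rw [hpow]
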